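-- pv_equiv track=rewrite | github.com/bigboyang/algorithm | 탐색/트로피진열.py | ascending
-- ===== SOURCE A (Python) =====
-- def ascending(array):
--     result = 1
--     now = array[0]
--     for i in range(1, len(array)):
--         if now < array[i]:
--             result += 1
--             now = array[i]
--     return result
-- ===== SOURCE B (Python) =====
-- def ascending(array):
--     runs = []
--     m = array[0]
--     for x in array:
--         if x > m:
--             m = x
--         runs.append(m)
--     return 1 + sum(1 for prev, cur in zip(runs, runs[1:]) if cur > prev)
-- ===== Notes on version B (the rewrite author's own statement) =====
-- stated objective: alternative
-- what changed: B first materialises the running-maximum (prefix-max) sequence in one pass, then counts strict increases between adjacent prefix maxima with a zip-based second pass, instead of threading a counter and current maximum through a single loop.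
import Mathlib
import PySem

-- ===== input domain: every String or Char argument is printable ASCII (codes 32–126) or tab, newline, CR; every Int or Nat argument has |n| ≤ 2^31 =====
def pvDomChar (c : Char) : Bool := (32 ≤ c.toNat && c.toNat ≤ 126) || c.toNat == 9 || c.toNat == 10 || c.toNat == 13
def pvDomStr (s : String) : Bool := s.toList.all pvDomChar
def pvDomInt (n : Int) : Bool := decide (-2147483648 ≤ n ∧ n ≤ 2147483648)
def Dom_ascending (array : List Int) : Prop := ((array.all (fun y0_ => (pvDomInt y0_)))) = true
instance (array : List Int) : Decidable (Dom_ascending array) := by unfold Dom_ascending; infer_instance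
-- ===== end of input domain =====

-- B builds the prefix-maximum list first and counts adjacent strict increases in a second pass;
-- same O(n) cost, different decomposition (alternative).

-- ===== PORT A =====
def ascending (array : List Int) : Int :=
  let now0 := PySem.List.pyGetD array 0 0
  let st := (PySem.List.pyRange 1 (array.length : Int) 1).foldl
    (fun (s : Int × Int) i =>
      let ai := PySem.List.pyGetD array i 0
      if s.2 < ai then (s.1 + 1, ai) else s) (1, now0)
  st.1

-- ===== PORT B =====
def ascending_alt (array : List Int) : Int :=
  let m0 := PySem.List.pyGetD array 0 0
  let runs := (array.foldl
    (fun (p : List Int × Int) x =>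
      let m := if x > p.2 then x else p.2
      (p.1 ++ [m], m)) ([], m0)).1
  1 + ((runs.zip (PySem.List.slice runs (some 1) none)).map
        (fun pc => if pc.2 > pc.1 then (1 : Int) else 0)).sum

-- ===== PRECONDITION & SPEC =====
-- Pre_ excludes exactly the empty list, on which A raises IndexError (array[0]).
def Pre_ascending (array : List Int) : Prop := array ≠ []
instance (array : List Int) : Decidable (Pre_ascending array) := by unfold Pre_ascending; infer_instance
def pvWitness_ascending : List Int := ([1, 3, 2, 3])

def Spec_ascending (array : List Int) (out : Int) : Prop := out = ascending_alt array
instance (array : List Int) (out : Int) : Decidable (Spec_ascending array out) := by unfold Spec_ascending; infer_instance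

-- ===== CLAIM (what is proved, stated in full; the proofs are below) =====
def Claim_equal_ascending : Prop := ∀ (array : List Int), Dom_ascending array → Pre_ascending array → Spec_ascending array (ascending array)

-- ===== LEMMAS AND PROOFS =====

-- number of strict running-maximum increases along t, starting from current max m
def countIncr (m : Int) : List Int → Int
  | [] => 0
  | x :: t => if m < x then 1 + countIncr x t else countIncr m t

-- the prefix-max sequence of t starting from current max m
def runsFrom (m : Int) : List Int → List Int
  | [] => []
  | x :: t => let m' := if x > m then x else m; m' :: runsFrom m' t

theorem foldlA_eq (t : List Int) (r m : Int) :
    (t.foldl (fun (s : Int × Int) x => if s.2 < x then (s.1 + 1, x) else s) (r, m)).1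
      = r + countIncr m t := by
  induction t generalizing r m with
  | nil => simp [countIncr]
  | cons x t ih =>
    simp only [List.foldl, countIncr]
    by_cases h : m < x
    · simp [h, ih]; ring
    · simp [h, ih]

theorem foldlB_eq (t : List Int) (acc : List Int) (m : Int) :
    (t.foldl (fun (p : List Int × Int) x =>
        let m' := if x > p.2 then x else p.2
        (p.1 ++ [m'], m')) (acc, m)).1 = acc ++ runsFrom m t := by
  induction t generalizing acc m with
  | nil => simp [runsFrom]
  | cons x t ih =>
    simp only [List.foldl, runsFrom]
    rw [ih]
    simp

theorem zipSum_runs (t : List Int) (m : Int) :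
    (((m :: runsFrom m t).zip (runsFrom m t)).map
        (fun pc => if pc.2 > pc.1 then (1 : Int) else 0)).sum = countIncr m t := by
  induction t generalizing m with
  | nil => simp [runsFrom, countIncr]
  | cons x t ih =>
    simp only [runsFrom, countIncr, List.zip_cons_cons, List.map_cons, List.sum_cons]
    by_cases h : m < x
    · have hx : (if x > m then x else m) = x := by simp [h]
      rw [hx, ih]
      simp [h]
    · have hx : (if x > m then x else m) = m := by
        simp [show ¬ x > m from h]
      rw [hx, ih]
      simp [h]

-- ===== VERDICT (by name: the statement is the Claim_ definition above) =====
theorem ascending_spec : Claim_equal_ascending := by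
  intro array _ hpre
  obtain ⟨a, t, rfl⟩ : ∃ a t, array = a :: t := by
    cases array with
    | nil => exact absurd rfl hpre
    | cons a t => exact ⟨a, t, rfl⟩
  unfold Spec_ascending ascending ascending_alt
  simp only [PySem.List.pyGetD_zero_cons]
  rw [PySem.List.foldl_pyRange_pyGetD' (a :: t) 0
        (fun (s : Int × Int) x => if s.2 < x then (s.1 + 1, x) else s) (1, a) (by norm_num)]
  simp only [Int.toNat_one, List.drop_one, List.tail_cons]
  rw [foldlA_eq]
  have hruns : ((a :: t).foldl (fun (p : List Int × Int) x =>
      let m' := if x > p.2 then x else p.2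
      (p.1 ++ [m'], m')) ([], a)).1 = a :: runsFrom a t := by
    rw [foldlB_eq]
    simp [runsFrom]
  simp only [hruns]
  rw [show PySem.List.slice (a :: runsFrom a t) (some 1) none = runsFrom a t from by
        rw [PySem.List.slice_from_one]; rfl]
  rw [zipSum_runs]
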